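-- pv_equiv track=rewrite | github.com/sheng1993/datastructures_algorithms | notebook/strings/suffix_array.py | sort_double
-- ===== SOURCE A (Python) =====
-- def sort_double(s: str, l: int, order: list, _class: list):
--     count = [0] * len(s)
--     newOrder = [0] * len(s)
--
--     for i in range(len(s)):
--         count[_class[i]] += 1
--
--     for j in range(1, len(s)):
--         count[j] = count[j - 1] + count[j]
--
--     for i in range(len(s) - 1, -1 , -1):
--         start = (order[i] - l + len(s)) % len(s)
--         cl = _class[start]
--         count[cl] -= 1
--         newOrder[count[cl]] = start
--
--     return newOrder
-- ===== SOURCE B (Python) =====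
-- def sort_double(s: str, l: int, order: list, _class: list):
--     n = len(s)
--     buckets = [[] for _ in range(n)]
--     for i in range(n):
--         start = (order[i] - l + n) % n
--         buckets[_class[start]].append(start)
--     out = []
--     for bucket in buckets:
--         out += bucket
--     return out
-- ===== Notes on version B (the rewrite author's own statement) =====
-- stated objective: simpler
-- what changed: Replaces the three-pass counting sort (count, prefix-sum, backward placement into a preallocated array) with a single forward pass that drops each shifted start into its class bucket and then concatenates the buckets; stability comes from appending in increasing i order instead of prefix-sum offsets.
-- outside the precondition, e.g. on sort_double('abc', 0, [0, 0, 1], [0, 1, 2]): A returns [0, 1, 0], B returns [0, 0, 1]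
import Mathlib
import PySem

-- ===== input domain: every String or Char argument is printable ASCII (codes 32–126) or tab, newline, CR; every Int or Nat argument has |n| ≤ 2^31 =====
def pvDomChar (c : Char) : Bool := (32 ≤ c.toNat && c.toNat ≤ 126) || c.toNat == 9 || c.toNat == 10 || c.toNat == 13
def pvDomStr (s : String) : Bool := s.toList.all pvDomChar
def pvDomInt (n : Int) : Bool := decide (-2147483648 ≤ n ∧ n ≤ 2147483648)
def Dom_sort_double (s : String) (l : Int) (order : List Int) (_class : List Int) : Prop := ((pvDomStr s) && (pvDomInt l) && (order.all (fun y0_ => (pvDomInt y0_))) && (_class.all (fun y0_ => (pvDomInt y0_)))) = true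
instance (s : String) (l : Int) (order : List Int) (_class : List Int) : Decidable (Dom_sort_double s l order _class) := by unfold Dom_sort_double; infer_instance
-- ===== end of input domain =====

-- B replaces A's three-pass stable counting sort by a one-pass bucket sort (append each
-- shifted start to its class's bucket, then concatenate the buckets); same O(n) cost, simpler.

-- ===== PORT A =====
def sort_double (s : String) (l : Int) (order : List Int) (_class : List Int) : List Int :=
  let n : Nat := s.toList.length
  let count0 : List Int := List.replicate n 0
  let newOrder0 : List Int := List.replicate n 0
  let count1 : List Int := (PySem.List.pyRange 0 (n : Int) 1).foldl (fun count i =>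
      let c := PySem.List.pyGetD _class i 0
      PySem.List.pySetD count c (PySem.List.pyGetD count c 0 + 1)) count0
  let count2 : List Int := (PySem.List.pyRange 1 (n : Int) 1).foldl (fun count j =>
      PySem.List.pySetD count j (PySem.List.pyGetD count (j - 1) 0 + PySem.List.pyGetD count j 0)) count1
  let res := (PySem.List.pyRange ((n : Int) - 1) (-1) (-1)).foldl
      (fun (st : List Int × List Int) i =>
        let start := PySem.Int.mod (PySem.List.pyGetD order i 0 - l + (n : Int)) (n : Int)
        let cl := PySem.List.pyGetD _class start 0
        let count' := PySem.List.pySetD st.1 cl (PySem.List.pyGetD st.1 cl 0 - 1)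
        (count', PySem.List.pySetD st.2 (PySem.List.pyGetD count' cl 0) start))
      (count2, newOrder0)
  res.2

-- ===== PORT B =====
def sort_double_alt (s : String) (l : Int) (order : List Int) (_class : List Int) : List Int :=
  let n : Nat := s.toList.length
  let buckets0 : List (List Int) := List.replicate n []
  let buckets := (PySem.List.pyRange 0 (n : Int) 1).foldl (fun bs i =>
      let start := PySem.Int.mod (PySem.List.pyGetD order i 0 - l + (n : Int)) (n : Int)
      let cl := PySem.List.pyGetD _class start 0
      PySem.List.pySetD bs cl (PySem.List.pyGetD bs cl [] ++ [start])) buckets0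
  buckets.foldl (fun out bucket => out ++ bucket) []

-- ===== PRECONDITION & SPEC =====
-- helpers read by Pre_: with n = len(s), the effective (Python-index) class of position j,
-- and the shifted start position derived from order[i]
def pvCls (n : Nat) (_class : List Int) (j : Nat) : Nat :=
  (PySem.Int.mod (_class.getD j 0) (n : Int)).toNat
def pvStart (n : Nat) (l : Int) (order : List Int) (i : Nat) : Nat :=
  (PySem.Int.mod (order.getD i 0 - l + (n : Int)) (n : Int)).toNat

-- Pre_ restricts to the natural domain of the doubling construction: order/_class cover the
-- n = len(s) positions, every class label is a valid Python index into the length-n count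
-- array (A raises IndexError otherwise), and the multiset of classes of the derived start
-- positions equals the multiset of classes of positions 0..n-1 (true in particular whenever
-- order encodes a permutation of the starts, the data structure's invariant); outside that
-- multiset condition A's counting phase disagrees with its placement phase and its output
-- keeps stale zeros / overwritten slots that are an accident of the implementation.
def Pre_sort_double (s : String) (l : Int) (order : List Int) (_class : List Int) : Prop :=
  s.toList.length ≤ order.length ∧ s.toList.length ≤ _class.length ∧
  (∀ i < s.toList.length,
      -(s.toList.length : Int) ≤ _class.getD i 0 ∧ _class.getD i 0 < (s.toList.length : Int)) ∧
  ((List.range s.toList.length).map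
      (fun i => pvCls s.toList.length _class (pvStart s.toList.length l order i))).Perm
    ((List.range s.toList.length).map (pvCls s.toList.length _class))
instance (s : String) (l : Int) (order : List Int) (_class : List Int) :
    Decidable (Pre_sort_double s l order _class) := by unfold Pre_sort_double; infer_instance

def pvWitness_sort_double : String × Int × List Int × List Int := ("ab", 1, [0, 1], [0, 1])

def Spec_sort_double (s : String) (l : Int) (order : List Int) (_class : List Int) (out : List Int) : Prop := out = sort_double_alt s l order _class
instance (s : String) (l : Int) (order : List Int) (_class : List Int) (out : List Int) : Decidable (Spec_sort_double s l order _class out) := by unfold Spec_sort_double; infer_instance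

-- ===== CLAIM (what is proved, stated in full; the proofs are below) =====
def Claim_equal_sort_double : Prop := ∀ (s : String) (l : Int) (order : List Int) (_class : List Int), Dom_sort_double s l order _class → Pre_sort_double s l order _class → Spec_sort_double s l order _class (sort_double s l order _class)

-- ===== LEMMAS AND PROOFS =====

theorem pv_emod_shift (i : Int) (n : Nat) : (i + (n : Int)) % (n : Int) = i % (n : Int) := by
  simp

theorem pv_getD_mod {α : Type} (xs : List α) (i : Int) (d : α)
    (h1 : -(xs.length : Int) ≤ i) (h2 : i < (xs.length : Int)) :
    PySem.List.pyGetD xs i d = xs.getD (PySem.Int.mod i (xs.length : Int)).toNat d := by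
  have hn : 0 < xs.length := by omega
  rw [PySem.Int.mod_eq_emod_of_pos (by exact_mod_cast hn)]
  by_cases h0 : 0 ≤ i
  · rw [Int.emod_eq_of_lt h0 h2]
    simp [PySem.List.pyGetD, PySem.List.pyGet?, PySem.List.pyIdx?, h0, h2,
      List.getD_eq_getElem?_getD]
  · have heq : i % (xs.length : Int) = i + xs.length := by
      rw [← pv_emod_shift i xs.length]
      exact Int.emod_eq_of_lt (by omega) (by omega)
    rw [heq]
    simp [PySem.List.pyGetD, PySem.List.pyGet?, PySem.List.pyIdx?, h0, h1,
      List.getD_eq_getElem?_getD]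
    congr 2
    omega

theorem pv_setD_mod {α : Type} (xs : List α) (i : Int) (v : α)
    (h1 : -(xs.length : Int) ≤ i) (h2 : i < (xs.length : Int)) :
    PySem.List.pySetD xs i v = xs.set (PySem.Int.mod i (xs.length : Int)).toNat v := by
  have hn : 0 < xs.length := by omega
  rw [PySem.Int.mod_eq_emod_of_pos (by exact_mod_cast hn)]
  by_cases h0 : 0 ≤ i
  · rw [Int.emod_eq_of_lt h0 h2]
    simp [PySem.List.pySetD, PySem.List.pySet?, PySem.List.pyIdx?, h0, h2]
  · have heq : i % (xs.length : Int) = i + xs.length := by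
      rw [← pv_emod_shift i xs.length]
      exact Int.emod_eq_of_lt (by omega) (by omega)
    rw [heq]
    simp [PySem.List.pySetD, PySem.List.pySet?, PySem.List.pyIdx?, h0, h1]
    congr 2
    omega

theorem pv_mod_toNat_lt (i : Int) (n : Nat) (hn : 0 < n) :
    (PySem.Int.mod i (n : Int)).toNat < n := by
  have h := PySem.Int.mod_lt (a := i) (b := (n : Int)) (by exact_mod_cast hn)
  omega

theorem pv_getD_set {α : Type} (xs : List α) (j t : Nat) (v d : α)
    (ht : t < xs.length) :
    (xs.set j v).getD t d = if j = t then v else xs.getD t d := by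
  by_cases h : j = t
  · subst h
    rw [List.getD_eq_getElem?_getD, List.getElem?_set]
    simp [ht]
  · rw [List.getD_eq_getElem?_getD, List.getElem?_set, List.getD_eq_getElem?_getD]
    simp [h]

theorem pv_countP_le_split (l : List Nat) (g : Nat → Nat) (b : Nat) :
    l.countP (fun j => g j ≤ b) = l.countP (fun j => g j < b) + l.countP (fun j => g j = b) := by
  induction l with
  | nil => simp
  | cons x xs ih =>
    simp only [List.countP_cons, ih]
    by_cases h0 : g x ≤ b <;> by_cases h1 : g x < b <;> by_cases h2 : g x = b <;>
      simp [h0, h1, h2] <;> omega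



def pvA1 (n : Nat) (_class : List Int) (m : Nat) : List Int :=
  (PySem.List.pyRange 0 (m : Int) 1).foldl (fun count i =>
      let c := PySem.List.pyGetD _class i 0
      PySem.List.pySetD count c (PySem.List.pyGetD count c 0 + 1)) (List.replicate n (0 : Int))

theorem pv_loop1 (n : Nat) (_class : List Int)
    (hb : ∀ i < n, -(n : Int) ≤ _class.getD i 0 ∧ _class.getD i 0 < (n : Int))
    (m : Nat) (hm : m ≤ n) :
    (pvA1 n _class m).length = n ∧
    ∀ t < n, (pvA1 n _class m).getD t 0 =
      ((List.range m).countP (fun j => pvCls n _class j = t) : Int) := by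
  induction m with
  | zero =>
    constructor
    · simp [pvA1, PySem.List.pyRange_one_eq_nil (by omega : (0:Int) ≤ 0)]
    · intro t ht
      simp [pvA1, PySem.List.pyRange_one_eq_nil (by omega : (0:Int) ≤ 0), List.getD_eq_getElem?_getD, ht]
  | succ m ih =>
    obtain ⟨ihl, ihv⟩ := ih (by omega)
    have hn : 0 < n := by omega
    have hstep : pvA1 n _class (m + 1) =
        (pvA1 n _class m).set (pvCls n _class m)
          ((pvA1 n _class m).getD (pvCls n _class m) 0 + 1) := by
      have hr : ((m + 1 : Nat) : Int) = (m : Int) + 1 := by push_cast; ring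
      rw [pvA1, hr, PySem.List.pyRange_one_succ_right (by positivity), List.foldl_append]
      simp only [List.foldl_cons, List.foldl_nil]
      rw [← pvA1]
      obtain ⟨hb1, hb2⟩ := hb m (by omega)
      rw [show PySem.List.pyGetD _class (m : Int) 0 = _class.getD m 0 by simp]
      rw [pv_setD_mod _ _ _ (by rw [ihl]; exact hb1) (by rw [ihl]; exact hb2),
          pv_getD_mod _ _ _ (by rw [ihl]; exact hb1) (by rw [ihl]; exact hb2), ihl]
      rfl
    constructor
    · rw [hstep]; simp [ihl]
    · intro t ht
      rw [hstep, pv_getD_set _ _ _ _ _ (by rw [ihl]; exact ht),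
          List.range_succ, List.countP_append]
      by_cases h : pvCls n _class m = t
      · rw [if_pos h, h, ihv t ht]
        simp [h]
      · rw [if_neg h, ihv t ht]
        simp [h]
def pvCnt (n : Nat) (cb : Nat → Nat) (t : Nat) : Nat := (List.range n).countP (fun j => cb j = t)
def pvSlo (n : Nat) (cb : Nat → Nat) (t : Nat) : Nat := (List.range n).countP (fun j => cb j < t)
def pvC (n : Nat) (cb : Nat → Nat) (t : Nat) : Nat := (List.range n).countP (fun j => cb j ≤ t)
def pvKb (n : Nat) (cb f : Nat → Nat) (b : Nat) : Nat := (List.range n).countP (fun i => cb (f i) = b)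
def pvPos (n : Nat) (cb f : Nat → Nat) (i : Nat) : Nat :=
  pvSlo n cb (cb (f i)) + (List.range i).countP (fun i' => cb (f i') = cb (f i))

theorem pvC_eq_slo_add_cnt (n : Nat) (cb : Nat → Nat) (t : Nat) :
    pvC n cb t = pvSlo n cb t + pvCnt n cb t := pv_countP_le_split _ cb t

theorem pvSlo_succ (n : Nat) (cb : Nat → Nat) (t : Nat) :
    pvSlo n cb (t + 1) = pvC n cb t := by
  unfold pvSlo pvC
  apply List.countP_congr
  intro x _
  simp

theorem pvC_succ (n : Nat) (cb : Nat → Nat) (t : Nat) :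
    pvC n cb (t + 1) = pvC n cb t + pvCnt n cb (t + 1) := by
  rw [pvC_eq_slo_add_cnt n cb (t + 1), pvSlo_succ]

def pvA2 (n : Nat) (_class : List Int) (m : Nat) : List Int :=
  (PySem.List.pyRange 1 (m : Int) 1).foldl (fun count j =>
      PySem.List.pySetD count j
        (PySem.List.pyGetD count (j - 1) 0 + PySem.List.pyGetD count j 0)) (pvA1 n _class n)

theorem pv_loop2 (n : Nat) (_class : List Int)
    (hb : ∀ i < n, -(n : Int) ≤ _class.getD i 0 ∧ _class.getD i 0 < (n : Int))
    (m : Nat) (h1 : 1 ≤ m) (hm : m ≤ n) :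
    (pvA2 n _class m).length = n ∧
    ∀ t < n, (pvA2 n _class m).getD t 0 =
      if t < m then (pvC n (pvCls n _class) t : Int) else (pvCnt n (pvCls n _class) t : Int) := by
  induction m with
  | zero => omega
  | succ m ih =>
    by_cases hm1 : m = 0
    · subst hm1
      obtain ⟨hl, hv⟩ := pv_loop1 n _class hb n le_rfl
      have hbase : pvA2 n _class (0 + 1) = pvA1 n _class n := by
        rw [pvA2]
        have hone : (((0 + 1 : Nat)) : Int) = 1 := by norm_num
        rw [hone, PySem.List.pyRange_one_eq_nil (by omega : (1:Int) ≤ 1)]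
        rfl
      rw [hbase]
      refine ⟨hl, fun t ht => ?_⟩
      rw [hv t ht]
      by_cases h : t < 1
      · have ht0 : t = 0 := by omega
        subst ht0
        rw [if_pos h]
        norm_num [pvC, pvCnt]
      · rw [if_neg h]
        rfl
    · obtain ⟨ihl, ihv⟩ := ih (by omega) (by omega)
      have hstep : pvA2 n _class (m + 1) =
          (pvA2 n _class m).set m
            ((pvA2 n _class m).getD (m - 1) 0 + (pvA2 n _class m).getD m 0) := by
      -- range(1, m+1) = range(1, m) ++ [m]
        have hr : ((m + 1 : Nat) : Int) = (m : Int) + 1 := by push_cast; ring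
        rw [pvA2, hr, PySem.List.pyRange_one_succ_right (by exact_mod_cast Nat.one_le_iff_ne_zero.mpr hm1), List.foldl_append]
        simp only [List.foldl_cons, List.foldl_nil]
        rw [← pvA2]
        have hc : ((m : Int) - 1) = ((m - 1 : Nat) : Int) := by
          have : 1 ≤ m := by omega
          push_cast [this]
          ring
        rw [hc]
        simp
      refine ⟨by rw [hstep]; simp [ihl], fun t ht => ?_⟩
      rw [hstep, pv_getD_set _ _ _ _ _ (by rw [ihl]; exact ht)]
      by_cases h : m = t
      · subst h
        rw [if_pos rfl, ihv (m - 1) (by omega), ihv m ht, if_pos (by omega), if_neg (by omega),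
            if_pos (by omega)]
        have : m - 1 + 1 = m := by omega
        rw [← this, pvC_succ]
        push_cast
        rw [this]
      · rw [if_neg h, ihv t ht]
        by_cases h2 : t < m
        · rw [if_pos h2, if_pos (by omega)]
        · rw [if_neg h2, if_neg (by omega)]
theorem pvPos_lt (n : Nat) (cb f : Nat → Nat)
    (hk : ∀ b, pvKb n cb f b = pvCnt n cb b) (i : Nat) (hi : i < n) :
    pvPos n cb f i < n := by
  have hpref : (List.range i).countP (fun i' => cb (f i') = cb (f i)) < pvKb n cb f (cb (f i)) := by
    have hsub : (List.range (i + 1)).Sublist (List.range n) := List.range_sublist.mpr (by omega)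
    have h1 := List.Sublist.countP_le (p := fun i' => decide (cb (f i') = cb (f i))) hsub
    rw [List.range_succ, List.countP_append] at h1
    simp at h1
    unfold pvKb
    omega
  have hC : pvC n cb (cb (f i)) ≤ n := by
    have := List.countP_le_length (l := List.range n) (p := fun j => decide (cb j ≤ cb (f i)))
    simpa [pvC] using this
  have := pvC_eq_slo_add_cnt n cb (cb (f i))
  rw [← hk (cb (f i))] at this
  unfold pvPos
  omega

theorem pvPos_inj (n : Nat) (cb f : Nat → Nat)
    (hk : ∀ b, pvKb n cb f b = pvCnt n cb b) :
    ∀ i, i < n → ∀ i', i' < n → pvPos n cb f i = pvPos n cb f i' → i = i' := by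
  -- strictly monotone-within-class positions, disjoint class intervals
  have key : ∀ i i', i < i' → i' < n → pvPos n cb f i < pvPos n cb f i' ∨
      pvPos n cb f i' < pvPos n cb f i := by
    intro i i' hlt hn'
    rcases Nat.lt_trichotomy (cb (f i)) (cb (f i')) with ht | ht | ht
    · -- class of i strictly smaller: pos i < C (cb (f i)) ≤ slo (cb (f i')) ≤ pos i'
      left
      have h1 : pvPos n cb f i < pvC n cb (cb (f i)) := by
        have hpref : (List.range i).countP (fun j => cb (f j) = cb (f i)) <
            pvKb n cb f (cb (f i)) := by
          have hsub : (List.range (i + 1)).Sublist (List.range n) :=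
            List.range_sublist.mpr (by omega)
          have h1 := List.Sublist.countP_le (p := fun j => decide (cb (f j) = cb (f i))) hsub
          rw [List.range_succ, List.countP_append] at h1
          simp at h1
          unfold pvKb
          omega
        have := pvC_eq_slo_add_cnt n cb (cb (f i))
        rw [← hk (cb (f i))] at this
        unfold pvPos
        omega
      have h2 : pvC n cb (cb (f i)) ≤ pvSlo n cb (cb (f i')) := by
        unfold pvC pvSlo
        apply List.countP_mono_left
        intro x _
        simp
        omega
      have h3 : pvSlo n cb (cb (f i')) ≤ pvPos n cb f i' := Nat.le_add_right _ _
      omega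
    · -- same class: the within-class rank is strictly monotone
      left
      have hc1 : ∀ (L : List Nat), L.countP (fun j => cb (f j) = cb (f i)) =
          L.countP (fun j => cb (f j) = cb (f i')) := by
        intro L
        apply List.countP_congr
        intro x _
        simp [ht]
      have hsub : (List.range (i + 1)).Sublist (List.range i') :=
        List.range_sublist.mpr (by omega)
      have h1 := List.Sublist.countP_le (p := fun j => decide (cb (f j) = cb (f i))) hsub
      rw [List.range_succ, List.countP_append, hc1, hc1] at h1
      simp [ht] at h1
      unfold pvPos
      rw [ht]
      omega
    · -- class of i' strictly smaller
      right
      have h1 : pvPos n cb f i' < pvC n cb (cb (f i')) := by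
        have hpref : (List.range i').countP (fun j => cb (f j) = cb (f i')) <
            pvKb n cb f (cb (f i')) := by
          have hsub : (List.range (i' + 1)).Sublist (List.range n) :=
            List.range_sublist.mpr (by omega)
          have h1 := List.Sublist.countP_le (p := fun j => decide (cb (f j) = cb (f i'))) hsub
          rw [List.range_succ, List.countP_append] at h1
          simp at h1
          unfold pvKb
          omega
        have := pvC_eq_slo_add_cnt n cb (cb (f i'))
        rw [← hk (cb (f i'))] at this
        unfold pvPos
        omega
      have h2 : pvC n cb (cb (f i')) ≤ pvSlo n cb (cb (f i)) := by
        unfold pvC pvSlo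
        apply List.countP_mono_left
        intro x _
        simp
        omega
      have h3 : pvSlo n cb (cb (f i)) ≤ pvPos n cb f i := Nat.le_add_right _ _
      omega
  intro i hi i' hi' heq
  rcases Nat.lt_trichotomy i i' with h | h | h
  · rcases key i i' h hi' with hlt | hlt <;> omega
  · exact h
  · rcases key i' i h hi with hlt | hlt <;> omega

def pvStep3 (n : Nat) (l : Int) (order _class : List Int)
    (st : List Int × List Int) (i : Int) : List Int × List Int :=
  let start := PySem.Int.mod (PySem.List.pyGetD order i 0 - l + (n : Int)) (n : Int)
  let cl := PySem.List.pyGetD _class start 0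
  let count' := PySem.List.pySetD st.1 cl (PySem.List.pyGetD st.1 cl 0 - 1)
  (count', PySem.List.pySetD st.2 (PySem.List.pyGetD count' cl 0) start)

def pvInv (n : Nat) (cb f : Nat → Nat) (m : Nat) (st : List Int × List Int) : Prop :=
  st.1.length = n ∧ st.2.length = n ∧
  (∀ t < n, st.1.getD t 0 =
      (pvC n cb t : Int) - ((List.range' m (n - m)).countP (fun i => cb (f i) = t) : Int)) ∧
  (∀ i, m ≤ i → i < n → st.2.getD (pvPos n cb f i) 0 = ((f i : Nat) : Int)) ∧
  (∀ p < n, (∀ i, m ≤ i → i < n → pvPos n cb f i ≠ p) → st.2.getD p 0 = 0)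

theorem pv_range_split (n m : Nat) (hm : m ≤ n) :
    List.range n = List.range m ++ List.range' m (n - m) := by
  rw [List.range_eq_range', List.range_eq_range']
  have h := @List.range'_append 0 m (n - m) 1
  simp at h
  rw [h]
  congr 1
  omega

theorem pv_step3 (n : Nat) (l : Int) (order _class : List Int)
    (hb : ∀ i < n, -(n : Int) ≤ _class.getD i 0 ∧ _class.getD i 0 < (n : Int))
    (hk : ∀ b, pvKb n (pvCls n _class) (pvStart n l order) b = pvCnt n (pvCls n _class) b)
    (m : Nat) (hm : m < n) (st : List Int × List Int)
    (h : pvInv n (pvCls n _class) (pvStart n l order) (m + 1) st) :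
    pvInv n (pvCls n _class) (pvStart n l order) m (pvStep3 n l order _class st (m : Int)) := by
  obtain ⟨hl1, hl2, hcnt, hdone, hzero⟩ := h
  have hn : 0 < n := by omega
  have hnI : (0 : Int) < (n : Int) := by exact_mod_cast hn
  set cb := pvCls n _class with hcb
  set f := pvStart n l order with hf
  have hfm : f m < n := by
    rw [hf]; unfold pvStart; exact pv_mod_toNat_lt _ _ hn
  set t := cb (f m) with htdef
  have hts : t < n := by
    rw [htdef, hcb]; unfold pvCls; exact pv_mod_toNat_lt _ _ hn
  obtain ⟨hbl, hbu⟩ := hb (f m) hfm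
  -- the raw class value and its effective Nat index
  set raw : Int := _class.getD (f m) 0 with hraw
  have hstart : PySem.Int.mod (PySem.List.pyGetD order (m : Int) 0 - l + (n : Int)) (n : Int)
      = ((f m : Nat) : Int) := by
    rw [PySem.List.pyGetD_natCast, hf]
    unfold pvStart
    rw [Int.toNat_of_nonneg (PySem.Int.mod_nonneg _ hnI)]
  have hmodraw : (PySem.Int.mod raw (n : Int)).toNat = t := by
    rw [htdef, hcb]; rfl
  -- compute the step
  have hclget : PySem.List.pyGetD _class ((f m : Nat) : Int) 0 = raw := by
    simp [hraw]
  have hcount' : PySem.List.pySetD st.1 raw (PySem.List.pyGetD st.1 raw 0 - 1)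
      = st.1.set t (st.1.getD t 0 - 1) := by
    rw [pv_setD_mod st.1 raw _ (by rw [hl1]; exact hbl) (by rw [hl1]; exact hbu),
        pv_getD_mod st.1 raw 0 (by rw [hl1]; exact hbl) (by rw [hl1]; exact hbu), hl1, hmodraw]
  -- counting facts
  have e1 : pvC n cb t = pvSlo n cb t + pvCnt n cb t := pvC_eq_slo_add_cnt n cb t
  have e2 : pvKb n cb f t = pvCnt n cb t := hk t
  have esplit : ∀ t' : Nat, pvKb n cb f t' =
      (List.range m).countP (fun i => cb (f i) = t') +
      (List.range' m (n - m)).countP (fun i => cb (f i) = t') := by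
    intro t'
    unfold pvKb
    rw [pv_range_split n m (by omega), List.countP_append]
  have econs : ∀ t' : Nat, (List.range' m (n - m)).countP (fun i => cb (f i) = t') =
      (if t = t' then 1 else 0) +
      (List.range' (m + 1) (n - (m + 1))).countP (fun i => cb (f i) = t') := by
    intro t'
    have hr : n - m = (n - (m + 1)) + 1 := by omega
    rw [hr, List.range'_succ, List.countP_cons]
    by_cases hq : t = t'
    · simp [← htdef, hq]
      omega
    · simp [← htdef, hq]
  have hB : (List.range' m (n - m)).countP (fun i => cb (f i) = t)
      = 1 + (List.range' (m + 1) (n - (m + 1))).countP (fun i => cb (f i) = t) := by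
    rw [econs t]
    simp
  have hvalv : st.1.getD t 0 - 1 = ((pvPos n cb f m : Nat) : Int) := by
    rw [hcnt t hts]
    have hpos : pvPos n cb f m = pvSlo n cb t + (List.range m).countP (fun i => cb (f i) = t) := rfl
    rw [hpos]
    have hA := esplit t
    push_cast
    omega
  -- the written position
  have hposlt : pvPos n cb f m < n := pvPos_lt n cb f hk m hm
  have hgetset : (st.1.set t (st.1.getD t 0 - 1)).getD t 0 = st.1.getD t 0 - 1 := by
    rw [pv_getD_set _ _ _ _ _ (by simp [hl1]; exact hts), if_pos rfl]
  have hwrite : PySem.List.pyGetD (st.1.set t (st.1.getD t 0 - 1)) raw 0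
      = ((pvPos n cb f m : Nat) : Int) := by
    rw [pv_getD_mod _ raw 0 (by simp [hl1]; exact hbl) (by simp [hl1]; exact hbu)]
    simp only [List.length_set, hl1, hmodraw]
    rw [hgetset, hvalv]
  have hstep : pvStep3 n l order _class st (m : Int) =
      (st.1.set t (st.1.getD t 0 - 1),
       st.2.set (pvPos n cb f m) ((f m : Nat) : Int)) := by
    show (let start := PySem.Int.mod (PySem.List.pyGetD order (m : Int) 0 - l + (n : Int)) (n : Int)
          let cl := PySem.List.pyGetD _class start 0
          let count' := PySem.List.pySetD st.1 cl (PySem.List.pyGetD st.1 cl 0 - 1)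
          (count', PySem.List.pySetD st.2 (PySem.List.pyGetD count' cl 0) start)) = _
    simp only [hstart, hclget, hcount', hwrite]
    rw [PySem.List.pySetD_natCast]
  rw [hstep]
  refine ⟨by simp [hl1], by simp [hl2], ?_, ?_, ?_⟩
  · intro t' ht'
    rw [pv_getD_set _ _ _ _ _ (by rw [hl1]; exact ht')]
    by_cases hq : t = t'
    · rw [if_pos hq, ← hq, hcnt t hts]
      omega
    · rw [if_neg hq, hcnt t' ht']
      have hB' : (List.range' m (n - m)).countP (fun i => cb (f i) = t')
          = (List.range' (m + 1) (n - (m + 1))).countP (fun i => cb (f i) = t') := by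
        rw [econs t', if_neg hq]
        simp
      rw [hB']
  · intro i hmi hin
    rw [pv_getD_set _ _ _ _ _ (by rw [hl2]; exact pvPos_lt n cb f hk i hin)]
    by_cases hq : i = m
    · subst hq
      rw [if_pos rfl]
    · have hne : pvPos n cb f m ≠ pvPos n cb f i := by
        intro hcontra
        exact hq ((pvPos_inj n cb f hk m hm i hin hcontra).symm)
      rw [if_neg hne]
      exact hdone i (by omega) hin
  · intro p hp hnohit
    rw [pv_getD_set _ _ _ _ _ (by rw [hl2]; exact hp)]
    rw [if_neg (hnohit m (by omega) hm)]
    exact hzero p hp (fun i h1 h2 => hnohit i (by omega) h2)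

theorem pv_loop3 (n : Nat) (l : Int) (order _class : List Int)
    (hb : ∀ i < n, -(n : Int) ≤ _class.getD i 0 ∧ _class.getD i 0 < (n : Int))
    (hk : ∀ b, pvKb n (pvCls n _class) (pvStart n l order) b = pvCnt n (pvCls n _class) b) :
    ∀ m, m ≤ n → ∀ st, pvInv n (pvCls n _class) (pvStart n l order) m st →
      pvInv n (pvCls n _class) (pvStart n l order) 0
        ((PySem.List.pyRange ((m : Int) - 1) (-1) (-1)).foldl (pvStep3 n l order _class) st) := by
  intro m
  induction m with
  | zero =>
    intro _ st h
    rw [PySem.List.pyRange_neg_one_eq_nil (by omega)]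
    simpa using h
  | succ m ih =>
    intro hm st h
    have hc : ((m + 1 : Nat) : Int) - 1 = (m : Int) := by push_cast; ring
    rw [hc, PySem.List.pyRange_neg_one_cons (by omega), List.foldl_cons]
    exact ih (by omega) _ (pv_step3 n l order _class hb hk m (by omega) st h)
def pvB1 (n : Nat) (l : Int) (order _class : List Int) (m : Nat) : List (List Int) :=
  (PySem.List.pyRange 0 (m : Int) 1).foldl (fun bs i =>
      let start := PySem.Int.mod (PySem.List.pyGetD order i 0 - l + (n : Int)) (n : Int)
      let cl := PySem.List.pyGetD _class start 0
      PySem.List.pySetD bs cl (PySem.List.pyGetD bs cl [] ++ [start]))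
    (List.replicate n ([] : List Int))

-- the per-class bucket contents in terms of f and cb
def pvBkt (_n : Nat) (cb f : Nat → Nat) (m b : Nat) : List Int :=
  ((List.range m).filter (fun i => cb (f i) = b)).map (fun i => ((f i : Nat) : Int))

theorem pv_loopB (n : Nat) (l : Int) (order _class : List Int)
    (hb : ∀ i < n, -(n : Int) ≤ _class.getD i 0 ∧ _class.getD i 0 < (n : Int))
    (m : Nat) (hm : m ≤ n) :
    (pvB1 n l order _class m).length = n ∧
    ∀ b < n, (pvB1 n l order _class m).getD b [] =
      pvBkt n (pvCls n _class) (pvStart n l order) m b := by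
  induction m with
  | zero =>
    refine ⟨by simp [pvB1, PySem.List.pyRange_one_eq_nil (by omega : (0:Int) ≤ 0)], ?_⟩
    intro b hb'
    simp [pvB1, pvBkt, PySem.List.pyRange_one_eq_nil (by omega : (0:Int) ≤ 0),
      List.getD_eq_getElem?_getD, hb']
  | succ m ih =>
    obtain ⟨ihl, ihv⟩ := ih (by omega)
    have hn : 0 < n := by omega
    have hnI : (0 : Int) < (n : Int) := by exact_mod_cast hn
    have hfm : pvStart n l order m < n := by
      unfold pvStart; exact pv_mod_toNat_lt _ _ hn
    obtain ⟨hbl, hbu⟩ := hb (pvStart n l order m) hfm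
    have hstart : PySem.Int.mod (PySem.List.pyGetD order (m : Int) 0 - l + (n : Int)) (n : Int)
        = ((pvStart n l order m : Nat) : Int) := by
      rw [PySem.List.pyGetD_natCast]
      unfold pvStart
      rw [Int.toNat_of_nonneg (PySem.Int.mod_nonneg _ hnI)]
    have hstep : pvB1 n l order _class (m + 1) =
        (pvB1 n l order _class m).set (pvCls n _class (pvStart n l order m))
          ((pvB1 n l order _class m).getD (pvCls n _class (pvStart n l order m)) [] ++
            [((pvStart n l order m : Nat) : Int)]) := by
      have hr : ((m + 1 : Nat) : Int) = (m : Int) + 1 := by push_cast; ring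
      rw [pvB1, hr, PySem.List.pyRange_one_succ_right (by positivity), List.foldl_append]
      simp only [List.foldl_cons, List.foldl_nil]
      rw [← pvB1, hstart]
      rw [show PySem.List.pyGetD _class ((pvStart n l order m : Nat) : Int) 0
            = _class.getD (pvStart n l order m) 0 by simp]
      rw [pv_setD_mod _ _ _ (by rw [ihl]; exact hbl) (by rw [ihl]; exact hbu),
          pv_getD_mod _ _ _ (by rw [ihl]; exact hbl) (by rw [ihl]; exact hbu), ihl]
      rfl
    refine ⟨by rw [hstep]; simp [ihl], ?_⟩
    intro b hb'
    have hcls : pvCls n _class (pvStart n l order m) < n := pv_mod_toNat_lt _ _ hn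
    rw [hstep, pv_getD_set _ _ _ _ _ (by rw [ihl]; exact hb')]
    unfold pvBkt
    rw [List.range_succ, List.filter_append, List.map_append]
    by_cases h : pvCls n _class (pvStart n l order m) = b
    · rw [if_pos h, h, ihv b hb']
      unfold pvBkt
      simp [h]
    · rw [if_neg h, ihv b hb']
      unfold pvBkt
      simp [h]
theorem pv_flatten_prefix_len (n : Nat) (cb f : Nat → Nat)
    (hk : ∀ b, pvKb n cb f b = pvCnt n cb b) (t : Nat) :
    (List.flatten ((List.range t).map (fun b => pvBkt n cb f n b))).length = pvSlo n cb t := by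
  induction t with
  | zero => simp [pvSlo]
  | succ t ih =>
    rw [List.range_succ, List.map_append, List.flatten_append, List.length_append, ih]
    have hlen : (pvBkt n cb f n t).length = pvKb n cb f t := by
      unfold pvBkt pvKb
      rw [List.length_map, ← List.countP_eq_length_filter]
    rw [pvSlo_succ, pvC_eq_slo_add_cnt]
    simp [hlen, hk t]

theorem pv_filter_getElem (p : Nat → Bool) :
    ∀ n i, i < n → p i = true →
      ((List.range n).filter p)[(List.range i).countP p]? = some i := by
  intro n
  induction n with
  | zero => omega
  | succ n ih =>
    intro i hi hp
    rw [List.range_succ, List.filter_append]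
    by_cases h : i = n
    · subst h
      rw [List.getElem?_append_right (by rw [← List.countP_eq_length_filter])]
      rw [← List.countP_eq_length_filter]
      simp [hp]
    · have hlt : (List.range i).countP p < ((List.range n).filter p).length := by
        rw [← List.countP_eq_length_filter]
        have hsub : (List.range (i + 1)).Sublist (List.range n) :=
          List.range_sublist.mpr (by omega)
        have h1 := List.Sublist.countP_le (p := p) hsub
        rw [List.range_succ, List.countP_append] at h1
        simp [hp] at h1
        omega
      rw [List.getElem?_append_left hlt]
      exact ih i (by omega) hp

theorem pv_flat_getElem (n : Nat) (cb f : Nat → Nat)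
    (hc : ∀ j, cb j < n) (hk : ∀ b, pvKb n cb f b = pvCnt n cb b)
    (i : Nat) (hi : i < n) :
    (List.flatten ((List.range n).map (fun b => pvBkt n cb f n b)))[pvPos n cb f i]?
      = some ((f i : Nat) : Int) := by
  set t := cb (f i) with ht
  have hts : t < n := hc (f i)
  have hsplit : List.range n = List.range t ++ (t :: List.range' (t + 1) (n - (t + 1))) := by
    rw [pv_range_split n t (by omega)]
    congr 1
    have hr : n - t = (n - (t + 1)) + 1 := by omega
    rw [hr, List.range'_succ]
  rw [hsplit, List.map_append, List.flatten_append, List.map_cons, List.flatten_cons]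
  have hlenA : (List.flatten ((List.range t).map (fun b => pvBkt n cb f n b))).length
      = pvSlo n cb t := pv_flatten_prefix_len n cb f hk t
  have hpos : pvPos n cb f i = pvSlo n cb t + (List.range i).countP (fun j => cb (f j) = t) := rfl
  rw [List.getElem?_append_right (by rw [hlenA, hpos]; omega), hlenA, hpos]
  have hidx : pvSlo n cb t + (List.range i).countP (fun j => cb (f j) = t) - pvSlo n cb t
      = (List.range i).countP (fun j => cb (f j) = t) := by omega
  rw [hidx]
  have hr : (List.range i).countP (fun j => cb (f j) = t) < (pvBkt n cb f n t).length := by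
    unfold pvBkt
    rw [List.length_map, ← List.countP_eq_length_filter]
    have hsub : (List.range (i + 1)).Sublist (List.range n) :=
      List.range_sublist.mpr (by omega)
    have h1 := List.Sublist.countP_le (p := fun j => decide (cb (f j) = t)) hsub
    rw [List.range_succ, List.countP_append] at h1
    simp [← ht] at h1
    omega
  rw [List.getElem?_append_left hr]
  unfold pvBkt
  rw [List.getElem?_map, pv_filter_getElem _ n i hi (by simp [← ht])]
  rfl

theorem pv_pos_surj (n : Nat) (cb f : Nat → Nat)
    (hk : ∀ b, pvKb n cb f b = pvCnt n cb b) :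
    ∀ p < n, ∃ i, i < n ∧ pvPos n cb f i = p := by
  intro p hp
  have hnd : ((List.range n).map (pvPos n cb f)).Nodup := by
    refine (List.nodup_map_iff_inj_on List.nodup_range).mpr ?_
    intro x hx y hy hxy
    exact pvPos_inj n cb f hk x (List.mem_range.mp hx) y (List.mem_range.mp hy) hxy
  have hsub : ((List.range n).map (pvPos n cb f)) ⊆ List.range n := by
    intro x hx
    obtain ⟨i, hi, rfl⟩ := List.mem_map.mp hx
    exact List.mem_range.mpr (pvPos_lt n cb f hk i (List.mem_range.mp hi))
  have hperm := (List.subperm_of_subset hnd hsub).perm_of_length_le (by simp)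
  have : p ∈ (List.range n).map (pvPos n cb f) := hperm.mem_iff.mpr (List.mem_range.mpr hp)
  obtain ⟨i, hi, hpi⟩ := List.mem_map.mp this
  exact ⟨i, List.mem_range.mp hi, hpi⟩
theorem pv_foldl_append (L : List (List Int)) (acc : List Int) :
    L.foldl (fun out bucket => out ++ bucket) acc = acc ++ L.flatten := by
  have h := PySem.List.foldl_append_eq_flatMap (g := fun b : List Int => b) L acc
  simpa using h

theorem sort_double_main (s : String) (l : Int) (order _class : List Int)
    (hpre : Pre_sort_double s l order _class) :
    sort_double s l order _class = sort_double_alt s l order _class := by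
  obtain ⟨hol, hcll, hb, hperm⟩ := hpre
  by_cases hn0 : s.toList.length = 0
  · have e1 : sort_double s l order _class = [] := by
      simp [sort_double, hn0]
    have e2 : sort_double_alt s l order _class = [] := by
      simp [sort_double_alt, hn0, PySem.List.pyRange_one_eq_nil (by omega : (0:Int) ≤ 0)]
    rw [e1, e2]
  · set n := s.toList.length with hns
    have hn : 0 < n := by omega
    have hcAll : ∀ j, pvCls n _class j < n := fun j => pv_mod_toNat_lt _ _ hn
    have hk : ∀ b, pvKb n (pvCls n _class) (pvStart n l order) b = pvCnt n (pvCls n _class) b := by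
      intro b
      have h := hperm.countP_eq (p := fun x => decide (x = b))
      rw [List.countP_map, List.countP_map] at h
      unfold pvKb pvCnt
      simpa [Function.comp] using h
    -- A-side: run the invariant through the backward placement loop
    have hA : sort_double s l order _class =
        ((PySem.List.pyRange ((n : Int) - 1) (-1) (-1)).foldl (pvStep3 n l order _class)
          (pvA2 n _class n, List.replicate n 0)).2 := rfl
    obtain ⟨h2l, h2v⟩ := pv_loop2 n _class hb n hn le_rfl
    have hInit : pvInv n (pvCls n _class) (pvStart n l order) n
        (pvA2 n _class n, List.replicate n 0) := by
      refine ⟨h2l, by simp, ?_, ?_, ?_⟩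
      · intro t ht
        show (pvA2 n _class n).getD t 0 = _
        rw [h2v t ht, if_pos ht]
        simp
      · intro i h1 h2
        omega
      · intro p hp _
        show (List.replicate n (0 : Int)).getD p 0 = 0
        simp [List.getD_eq_getElem?_getD, hp]
    have hfin := pv_loop3 n l order _class hb hk n le_rfl _ hInit
    obtain ⟨_, hlen2, _, hdone, _⟩ := hfin
    -- B-side: the buckets and their concatenation
    have hBdef : sort_double_alt s l order _class =
        (pvB1 n l order _class n).foldl (fun out bucket => out ++ bucket) [] := rfl
    obtain ⟨hBl, hBv⟩ := pv_loopB n l order _class hb n le_rfl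
    have hBfull : pvB1 n l order _class n = (List.range n).map (fun b => pvBkt n (pvCls n _class) (pvStart n l order) n b) := by
      apply List.ext_getElem (by simp [hBl])
      intro b h1 h2
      have hb' : b < n := by rw [hBl] at h1; exact h1
      have hv := hBv b hb'
      rw [List.getD_eq_getElem _ _ (by rw [hBl]; exact hb')] at hv
      rw [hv]
      simp
    have hflat : sort_double_alt s l order _class =
        List.flatten ((List.range n).map (fun b => pvBkt n (pvCls n _class) (pvStart n l order) n b)) := by
      rw [hBdef, hBfull, pv_foldl_append]
      simp
    have hslon : pvSlo n (pvCls n _class) n = n := by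
      unfold pvSlo
      rw [List.countP_eq_length.mpr (fun a _ => by simpa using hcAll a)]
      simp
    have hflatlen : (List.flatten ((List.range n).map (fun b => pvBkt n (pvCls n _class) (pvStart n l order) n b))).length = n := by
      rw [pv_flatten_prefix_len n (pvCls n _class) (pvStart n l order) hk n, hslon]
    rw [hA, hflat]
    apply List.ext_getElem (by rw [hlen2, hflatlen])
    intro p h1 h2
    have hp : p < n := by rw [hlen2] at h1; exact h1
    obtain ⟨i, hi, hpi⟩ := pv_pos_surj n (pvCls n _class) (pvStart n l order) hk p hp
    have hAi := hdone i (Nat.zero_le i) hi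
    rw [hpi, List.getD_eq_getElem _ _ (by rw [hlen2]; exact hp)] at hAi
    have hBi := pv_flat_getElem n (pvCls n _class) (pvStart n l order) hcAll hk i hi
    rw [hpi, List.getElem?_eq_getElem h2] at hBi
    rw [hAi]
    exact (Option.some_injective _ hBi).symm

-- ===== VERDICT (by name: the statement is the Claim_ definition above) =====
theorem sort_double_spec : Claim_equal_sort_double := by
  intro s l order _class _hdom hpre
  unfold Spec_sort_double
  exact sort_double_main s l order _class hpre
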